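-- pv_equiv track=rewrite | github.com/HaolingZHANG/bioe-201 | 1/code.08.py | function
-- ===== SOURCE A (Python) =====
-- def function(pattern: str,
--              text: str,
--              mismatch: int) \
--         -> list:
--     records = []
--     for location in range(len(text) - len(pattern) + 1):
--         difference = sum(base_1 != base_2 for base_1, base_2 in zip(text[location: location + len(pattern)], pattern))
--         if difference <= mismatch:
--             records.append(location)
--     return records
-- ===== SOURCE B (Python) =====
-- def function(pattern: str, text: str, mismatch: int) -> list:
--     size = len(text) - len(pattern) + 1
--     if size <= 0:
--         return []
--     matches = [0] * size
--     for j in range(len(pattern)):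
--         base = pattern[j]
--         for offset in range(size):
--             if text[offset + j] == base:
--                 matches[offset] += 1
--     return [offset for offset in range(size)
--             if len(pattern) - matches[offset] <= mismatch]
-- ===== Notes on version B (the rewrite author's own statement) =====
-- stated objective: alternative
-- what changed: Instead of scanning each text window and counting its mismatches, B allocates a per-offset match-count array and iterates pattern-index-outer, crediting matches[offset] for every position where text agrees with the pattern character, then emits offsets whose mismatch count len(pattern)-matches[offset] is within the bound.
import Mathlib
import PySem

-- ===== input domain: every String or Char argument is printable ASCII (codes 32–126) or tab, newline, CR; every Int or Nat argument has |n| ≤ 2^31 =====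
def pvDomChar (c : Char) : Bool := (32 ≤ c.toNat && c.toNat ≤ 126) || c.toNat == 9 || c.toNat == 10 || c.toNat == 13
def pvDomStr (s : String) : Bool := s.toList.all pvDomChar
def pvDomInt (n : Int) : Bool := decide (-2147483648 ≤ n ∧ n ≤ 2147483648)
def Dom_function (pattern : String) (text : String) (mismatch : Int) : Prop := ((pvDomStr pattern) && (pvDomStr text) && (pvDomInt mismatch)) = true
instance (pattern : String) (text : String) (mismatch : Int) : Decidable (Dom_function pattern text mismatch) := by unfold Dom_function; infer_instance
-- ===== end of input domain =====

-- B replaces A's per-window mismatch scan by a per-offset match-count array filled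
-- pattern-index-outer (contribution accumulation); same result, alternative algorithm.

-- ===== PORT A =====
-- literal transliteration: for each window start, count mismatching zipped pairs
-- (sum of booleans ported as a sum of 0/1 ints), append the location when within bound
def function (pattern : String) (text : String) (mismatch : Int) : List Int :=
  let p := pattern.toList
  let t := text.toList
  (PySem.List.pyRange 0 ((t.length : Int) - (p.length : Int) + 1) 1).foldl
    (fun records location =>
      let window := PySem.List.slice t (some location) (some (location + (p.length : Int)))
      let difference : Int := ((window.zip p).map (fun bp => if bp.1 ≠ bp.2 then (1 : Int) else 0)).sum
      if difference ≤ mismatch then records ++ [location] else records) []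

-- ===== PORT B =====
-- literal transliteration of Source B: match-count array, outer loop over pattern indices,
-- inner loop over offsets incrementing matches[offset]; the in-range index accesses
-- pattern[j] / text[offset+j] are ported as getD (always in range here, hence exact)
def function_alt (pattern : String) (text : String) (mismatch : Int) : List Int :=
  let p := pattern.toList
  let t := text.toList
  let size : Int := (t.length : Int) - (p.length : Int) + 1
  if size ≤ 0 then []
  else
    let counts : List Int :=
      (List.range p.length).foldl
        (fun ms j =>
          let base := p.getD j ' '
          (List.range size.toNat).foldl
            (fun ms offset => if t.getD (offset + j) ' ' = base then ms.modify offset (· + 1) else ms)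
            ms)
        (List.replicate size.toNat 0)
    ((List.range size.toNat).filter
        (fun offset => decide ((p.length : Int) - counts.getD offset 0 ≤ mismatch))).map
      (fun offset => (offset : Int))

-- ===== PRECONDITION & SPEC =====
def Spec_function (pattern : String) (text : String) (mismatch : Int) (out : List Int) : Prop := out = function_alt pattern text mismatch
instance (pattern : String) (text : String) (mismatch : Int) (out : List Int) : Decidable (Spec_function pattern text mismatch out) := by unfold Spec_function; infer_instance

-- ===== CLAIM (what is proved, stated in full; the proofs are below) =====
def Claim_equal_function : Prop := ∀ (pattern : String) (text : String) (mismatch : Int), Dom_function pattern text mismatch → Spec_function pattern text mismatch (function pattern text mismatch)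

-- ===== LEMMAS AND PROOFS =====

-- the shared per-offset match count: how many pattern positions agree with the text
def pvMatch (t p : List Char) (o : Nat) (J : Nat) : Nat :=
  (List.range J).countP (fun j => t.getD (o + j) ' ' = p.getD j ' ')

-- B's inner loop preserves the length of the count array
theorem pv_inner_length (c : Nat → Prop) [DecidablePred c] (k : Nat) (L : List Int) :
    ((List.range k).foldl (fun ms o => if c o then ms.modify o (· + 1) else ms) L).length
      = L.length := by
  induction k generalizing L with
  | zero => rfl
  | succ k ih =>
    rw [List.range_succ, List.foldl_append]
    simp only [List.foldl_cons, List.foldl_nil]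
    split <;> simp [List.length_modify, ih]

-- B's inner loop adds 1 at exactly the offsets (below k) satisfying the condition
theorem pv_inner_getD (c : Nat → Prop) [DecidablePred c] (k : Nat) (L : List Int) (i : Nat)
    (hk : k ≤ L.length) :
    ((List.range k).foldl (fun ms o => if c o then ms.modify o (· + 1) else ms) L).getD i 0
      = L.getD i 0 + (if i < k ∧ c i then 1 else 0) := by
  induction k with
  | zero => simp
  | succ k ih =>
    rw [List.range_succ, List.foldl_append]
    simp only [List.foldl_cons, List.foldl_nil]
    have hR := pv_inner_length c k L
    by_cases hc : c k
    · rw [if_pos hc]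
      rw [List.getD_eq_getElem?_getD, List.getElem?_modify]
      by_cases hik : k = i
      · subst hik
        have hlt : k < ((List.range k).foldl (fun ms o => if c o then ms.modify o (· + 1) else ms) L).length := by
          omega
        rw [List.getElem?_eq_getElem hlt]
        have hval : ((List.range k).foldl (fun ms o => if c o then ms.modify o (· + 1) else ms) L)[k] = L.getD k 0 := by
          have hih := ih (by omega)
          rw [List.getD_eq_getElem?_getD, List.getElem?_eq_getElem hlt] at hih
          simpa using hih
        simp [hval, hc]
      · have hmap : ((fun a => if k = i then a + 1 else a) <$> ((List.range k).foldl (fun ms o => if c o then ms.modify o (· + 1) else ms) L)[i]?)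
            = ((List.range k).foldl (fun ms o => if c o then ms.modify o (· + 1) else ms) L)[i]? := by
          simp [hik]
        rw [hmap, ← List.getD_eq_getElem?_getD, ih (by omega)]
        have hiff : (i < k + 1 ∧ c i) ↔ (i < k ∧ c i) := by
          constructor
          · rintro ⟨h1, h2⟩; exact ⟨by omega, h2⟩
          · rintro ⟨h1, h2⟩; exact ⟨by omega, h2⟩
        simp only [hiff]
    · rw [if_neg hc, ih (by omega)]
      have hiff : (i < k + 1 ∧ c i) ↔ (i < k ∧ c i) := by
        constructor
        · rintro ⟨h1, h2⟩
          refine ⟨?_, h2⟩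
          rcases Nat.lt_succ_iff_lt_or_eq.mp h1 with h | h
          · exact h
          · subst h; exact absurd h2 hc
        · rintro ⟨h1, h2⟩; exact ⟨by omega, h2⟩
      simp only [hiff]

-- B's outer loop preserves the length of the count array
theorem pv_outer_length (t p : List Char) (S : Nat) (J : Nat) (L : List Int) :
    ((List.range J).foldl
        (fun ms j =>
          (List.range S).foldl
            (fun ms offset => if t.getD (offset + j) ' ' = p.getD j ' ' then ms.modify offset (· + 1) else ms)
            ms)
        L).length = L.length := by
  induction J generalizing L with
  | zero => rfl
  | succ J ih =>
    rw [List.range_succ, List.foldl_append]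
    simp only [List.foldl_cons, List.foldl_nil]
    rw [pv_inner_length, ih]

-- after the outer loop, slot i holds the number of agreeing pattern positions
theorem pv_outer_getD (t p : List Char) (S : Nat) (J : Nat) (i : Nat) (hi : i < S) :
    ((List.range J).foldl
        (fun ms j =>
          (List.range S).foldl
            (fun ms offset => if t.getD (offset + j) ' ' = p.getD j ' ' then ms.modify offset (· + 1) else ms)
            ms)
        (List.replicate S (0 : Int))).getD i 0 = (pvMatch t p i J : Int) := by
  induction J with
  | zero => simp [pvMatch]
  | succ J ih =>
    rw [List.range_succ, List.foldl_append]
    simp only [List.foldl_cons, List.foldl_nil]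
    rw [pv_inner_getD (fun o => t.getD (o + J) ' ' = p.getD J ' ') S _ i (by rw [pv_outer_length]; simp), ih]
    unfold pvMatch
    rw [List.range_succ, List.countP_append]
    simp only [List.countP_cons, List.countP_nil]
    have hiff : (i < S ∧ t.getD (i + J) ' ' = p.getD J ' ') ↔ t.getD (i + J) ' ' = p.getD J ' ' :=
      ⟨fun h => h.2, fun h => ⟨hi, h⟩⟩
    simp only [hiff]
    push_cast
    split_ifs <;> simp_all

-- counting equal zipped pairs = counting agreeing indices (getD form)
theorem pv_countP_zip (X Y : List Char) (m : Nat) (hX : X.length = m) (hY : Y.length = m) :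
    (X.zip Y).countP (fun bp => bp.1 = bp.2)
      = (List.range m).countP (fun j => X.getD j ' ' = Y.getD j ' ') := by
  induction m generalizing X Y with
  | zero =>
    rw [List.length_eq_zero_iff.mp hX]
    simp
  | succ m ih =>
    rcases X with _ | ⟨x, X'⟩
    · simp at hX
    rcases Y with _ | ⟨y, Y'⟩
    · simp at hY
    simp only [List.zip_cons_cons, List.countP_cons, List.range_succ_eq_map, List.countP_map]
    rw [ih X' Y' (by simpa using hX) (by simpa using hY)]
    simp only [Function.comp_def, Nat.succ_eq_add_one, List.getD_cons_succ, List.getD_cons_zero]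

-- the window's j-th character is text's (k+j)-th character
theorem pv_window_getD (t : List Char) (k m j : Nat) (hj : j < m) (hkm : k + m ≤ t.length) :
    ((t.drop k).take m).getD j ' ' = t.getD (k + j) ' ' := by
  have h1 : j < ((t.drop k).take m).length := by
    simp [List.length_take, List.length_drop]; omega
  have h2 : k + j < t.length := by omega
  rw [List.getD_eq_getElem _ _ h1, List.getD_eq_getElem _ _ h2]
  rw [List.getElem_take, List.getElem_drop]

-- A's mismatch count for window k equals len(pattern) minus the match count
theorem pv_diff_eq (t p : List Char) (k : Nat) (hkm : k + p.length ≤ t.length) :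
    ((((t.drop k).take p.length).zip p).map (fun bp => if bp.1 ≠ bp.2 then (1 : Int) else 0)).sum
      = (p.length : Int) - (pvMatch t p k p.length : Int) := by
  set X := (t.drop k).take p.length with hXdef
  have hX : X.length = p.length := by
    simp [hXdef, List.length_take, List.length_drop]; omega
  rw [PySem.List.sum_map_ite_one_zero' (fun bp => bp.1 ≠ bp.2) (X.zip p)]
  have hzlen : (X.zip p).length = p.length := by
    simp [List.length_zip, hX]
  have hsplit := List.length_eq_countP_add_countP (fun bp : Char × Char => decide (bp.1 = bp.2)) (l := X.zip p)
  have hne : (X.zip p).countP (fun a => decide ¬((fun bp : Char × Char => decide (bp.1 = bp.2)) a = true))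
      = (X.zip p).countP (fun bp => decide (bp.1 ≠ bp.2)) := by
    apply List.countP_congr
    intro a _
    simp
  have hcnt : (X.zip p).countP (fun bp => decide (bp.1 = bp.2)) = pvMatch t p k p.length := by
    rw [pv_countP_zip X p p.length hX rfl]
    unfold pvMatch
    apply List.countP_congr
    intro j hj
    rw [List.mem_range] at hj
    rw [pv_window_getD t k p.length j hj hkm]
  have hle : pvMatch t p k p.length ≤ p.length := by
    rw [← hcnt, ← hzlen]
    exact List.countP_le_length
  rw [hne, hcnt] at hsplit
  omega

-- ===== VERDICT (by name: the statement is the Claim_ definition above) =====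
theorem function_spec : Claim_equal_function := by
  intro pattern text mismatch _
  unfold Spec_function
  simp only [function, function_alt]
  set t := text.toList with ht
  set p := pattern.toList with hp
  by_cases hneg : (t.length : Int) - (p.length : Int) + 1 ≤ 0
  · rw [if_pos hneg, PySem.List.pyRange_one_eq_nil (by omega)]
    rfl
  · rw [if_neg hneg]
    set size : Int := (t.length : Int) - (p.length : Int) + 1 with hsize
    set S := size.toNat with hS
    have hSn : (size - 0).toNat = S := by omega
    rw [PySem.List.pyRange_one, hSn, List.foldl_map]
    rw [List.foldl_ext _ (fun (acc : List Int) (k : Nat) =>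
          if decide ((p.length : Int) - ((List.range p.length).foldl
                (fun ms j =>
                  (List.range S).foldl
                    (fun ms offset => if t.getD (offset + j) ' ' = p.getD j ' ' then ms.modify offset (· + 1) else ms)
                    ms)
                (List.replicate S (0 : Int))).getD k 0 ≤ mismatch)
          then acc ++ [(k : Int)] else acc) []
        (by
          intro acc k hk
          rw [List.mem_range] at hk
          have hkm : k + p.length ≤ t.length := by omega
          dsimp only
          rw [zero_add, PySem.List.slice_natCast_add t k p.length, pv_diff_eq t p k hkm,
            pv_outer_getD t p S p.length k hk]
          by_cases hle : (p.length : Int) - (pvMatch t p k p.length : Int) ≤ mismatch <;>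
            simp [hle])]
    rw [PySem.List.foldl_append_if]
    simp
    rw [List.map_eq_flatMap]
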